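-- pv_equiv track=rewrite | github.com/parthsl/scheduler-benchmarks | perf-trace/schedstat_parser.py | cpumask_to_cpulist
-- ===== SOURCE A (Python) =====
-- def cpumask_to_cpulist(cpumask):
--     n = int(cpumask, 16)
--     cpulist = []
--     iterator = 0
--
--     while n!=0:
--         if n%2 == 1:
--             cpulist.append(iterator)
--         n //= 2
--         iterator += 1
--
--     return cpulist
-- ===== SOURCE B (Python) =====
-- def cpumask_to_cpulist(cpumask):
--     # Kernighan-style: iterate once per SET bit, clearing the lowest set bit
--     # each round with n & (n-1); the cleared bit's index is bit_length minus 1.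
--     n = int(cpumask, 16)
--     cpulist = []
--     while n:
--         cleared = n & (n - 1)
--         cpulist.append((n - cleared).bit_length() - 1)
--         n = cleared
--     return cpulist
-- ===== Notes on version B (the rewrite author's own statement) =====
-- stated objective: alternative
-- what changed: Replaces A's bit-by-bit halving scan (one n%2 / n//=2 iteration per bit position, zeros included) with Kernighan's lowest-set-bit clearing: each iteration computes n & (n-1), appends the cleared bit's index via bit_length()-1, so the loop runs once per set bit instead of once per bit position.
import Mathlib
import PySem

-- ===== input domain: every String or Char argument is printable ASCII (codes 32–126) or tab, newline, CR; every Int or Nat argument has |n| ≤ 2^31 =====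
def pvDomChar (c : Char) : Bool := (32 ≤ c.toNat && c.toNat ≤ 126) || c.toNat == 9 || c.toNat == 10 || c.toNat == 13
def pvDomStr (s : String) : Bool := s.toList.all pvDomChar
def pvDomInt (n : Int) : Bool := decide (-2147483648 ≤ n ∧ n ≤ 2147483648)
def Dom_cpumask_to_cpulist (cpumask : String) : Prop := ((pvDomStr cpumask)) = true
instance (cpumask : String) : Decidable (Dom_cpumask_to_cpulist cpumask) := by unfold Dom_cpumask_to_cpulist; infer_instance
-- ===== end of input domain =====

-- B replaces A's bit-by-bit halving scan (one iteration per bit position, zeros included)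
-- with Kernighan's trick: one iteration per SET bit, clearing the lowest set bit with
-- n & (n-1) and reading its index off bit_length (alternative; same asymptotic cost).


-- ===== PORT A =====
-- the while-loop of A; Nat recursion is exact because Pre_ admits only n ≥ 0
-- (on a negative parsed value Python A never terminates)
def pvALoop (n : Nat) (iterator : Int) (cpulist : List Int) : List Int :=
  if n = 0 then cpulist
  else pvALoop (n / 2) (iterator + 1)
        (if n % 2 == 1 then cpulist ++ [iterator] else cpulist)
termination_by n
decreasing_by exact Nat.div_lt_self (Nat.pos_of_ne_zero (by assumption)) (by omega)

def cpumask_to_cpulist (cpumask : String) : List Int :=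
  match PySem.Int.ofStrBase? cpumask 16 with
  | none => []          -- int(cpumask, 16) raises ValueError; excluded by Pre_
  | some n => pvALoop n.toNat 0 []

-- ===== PORT B =====
-- B's while-loop; state kept as Nat, exact because Pre_ admits only n ≥ 0
def pvBLoop (n : Nat) (cpulist : List Int) : List Int :=
  if n = 0 then cpulist
  else
    let cleared := n &&& (n - 1)
    pvBLoop cleared (cpulist ++ [(PySem.Int.bitLength ((n - cleared : Nat) : Int) : Int) - 1])
termination_by n
decreasing_by
  exact Nat.lt_of_le_of_lt Nat.and_le_right (by omega)

def cpumask_to_cpulist_alt (cpumask : String) : List Int :=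
  match PySem.Int.ofStrBase? cpumask 16 with
  | none => []          -- int(cpumask, 16) raises ValueError; excluded by Pre_
  | some n => pvBLoop n.toNat []

-- ===== PRECONDITION & SPEC =====
-- Pre_ excludes strings on which int(cpumask, 16) raises ValueError, and negative
-- masks, on which A's while-loop never terminates (A returns on no excluded input).
def Pre_cpumask_to_cpulist (cpumask : String) : Prop :=
  0 ≤ (PySem.Int.ofStrBase? cpumask 16).getD (-1)
instance (cpumask : String) : Decidable (Pre_cpumask_to_cpulist cpumask) := by
  unfold Pre_cpumask_to_cpulist; infer_instance
def pvWitness_cpumask_to_cpulist : String := "ff"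

def Spec_cpumask_to_cpulist (cpumask : String) (out : List Int) : Prop := out = cpumask_to_cpulist_alt cpumask
instance (cpumask : String) (out : List Int) : Decidable (Spec_cpumask_to_cpulist cpumask out) := by unfold Spec_cpumask_to_cpulist; infer_instance

-- ===== CLAIM (what is proved, stated in full; the proofs are below) =====
def Claim_equal_cpumask_to_cpulist : Prop := ∀ (cpumask : String), Dom_cpumask_to_cpulist cpumask → Pre_cpumask_to_cpulist cpumask → Spec_cpumask_to_cpulist cpumask (cpumask_to_cpulist cpumask)

-- ===== LEMMAS AND PROOFS =====

-- canonical description both loops are proved equal to: the indices of the set bits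
-- of n, offset by it, in increasing order
def pvBits (n : Nat) (it : Int) : List Int :=
  if n = 0 then [] else (if n % 2 = 1 then [it] else []) ++ pvBits (n / 2) (it + 1)
termination_by n
decreasing_by exact Nat.div_lt_self (Nat.pos_of_ne_zero (by assumption)) (by omega)

-- the lowest set bit of n (0 for n = 0)
def pvLowbit (n : Nat) : Nat :=
  if n = 0 then 0 else if n % 2 = 1 then 1 else 2 * pvLowbit (n / 2)
termination_by n
decreasing_by exact Nat.div_lt_self (Nat.pos_of_ne_zero (by assumption)) (by omega)

theorem pvLowbit_le (n : Nat) : pvLowbit n ≤ n := by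
  fun_induction pvLowbit n with
  | case1 => simp
  | case2 n h h1 => omega
  | case3 n h h1 ih => omega

theorem pvLowbit_pos (n : Nat) (h : n ≠ 0) : 0 < pvLowbit n := by
  fun_induction pvLowbit n with
  | case1 => omega
  | case2 => omega
  | case3 n h h1 ih => have := ih (by omega); omega

-- one unfolding of Nat.land, bit by bit
theorem pvLand_rec (n m : Nat) (hn : n ≠ 0) (hm : m ≠ 0) :
    n &&& m = 2 * ((n / 2) &&& (m / 2)) + (if n % 2 = 1 ∧ m % 2 = 1 then 1 else 0) := by
  show Nat.bitwise _ n m = 2 * Nat.bitwise _ (n / 2) (m / 2) + _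
  rw [Nat.bitwise]
  simp only [if_neg hn, if_neg hm, Bool.and_eq_true, decide_eq_true_eq]
  split_ifs with h <;> omega

-- n & (n-1) clears exactly the lowest set bit
theorem pvLand_pred (n : Nat) (h : n ≠ 0) : n &&& (n - 1) = n - pvLowbit n := by
  induction n using Nat.strong_induction_on with
  | _ n ih =>
    rw [pvLowbit, if_neg h]
    by_cases hodd : n % 2 = 1
    · simp only [hodd, if_true]
      by_cases h1 : n = 1
      · subst h1; decide
      · rw [pvLand_rec n (n - 1) h (by omega)]
        have h2 : (n - 1) / 2 = n / 2 := by omega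
        rw [h2, Nat.and_self, if_neg (by omega)]
        omega
    · simp only [hodd, if_false]
      have h2 : n / 2 ≠ 0 := by omega
      have ihh := ih (n / 2) (by omega) h2
      have hle := pvLowbit_le (n / 2)
      rw [pvLand_rec n (n - 1) h (by omega)]
      have h3 : (n - 1) / 2 = n / 2 - 1 := by omega
      rw [h3, ihh, if_neg (by omega)]
      omega

-- peeling the lowest set bit off pvBits
theorem pvBits_lowbit (n : Nat) (it : Int) (h : n ≠ 0) :
    pvBits n it =
      (it + ((PySem.Int.bitLength ((pvLowbit n : Nat) : Int) : Int) - 1)) ::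
        pvBits (n - pvLowbit n) it := by
  induction n using Nat.strong_induction_on generalizing it with
  | _ n ih =>
    rw [pvBits, if_neg h, pvLowbit, if_neg h]
    by_cases hodd : n % 2 = 1
    · simp only [hodd, if_true]
      have hb1 : PySem.Int.bitLength ((1 : Nat) : Int) = 1 := by decide
      rw [hb1]
      by_cases h1 : n = 1
      · subst h1; simp [pvBits]
      · have he : (n - 1) % 2 = 0 := by omega
        have h2 : (n - 1) / 2 = n / 2 := by omega
        conv_rhs => rw [pvBits, if_neg (show n - 1 ≠ 0 by omega)]
        simp [he, h2]
    · simp only [hodd, if_false, List.nil_append]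
      have h2 : n / 2 ≠ 0 := by omega
      have hl := pvLowbit_pos (n / 2) h2
      have hle := pvLowbit_le (n / 2)
      have ihh := ih (n / 2) (by omega) (it + 1) h2
      rw [ihh]
      have hbl : PySem.Int.bitLength ((2 * pvLowbit (n / 2) : Nat) : Int) =
          PySem.Int.bitLength ((pvLowbit (n / 2) : Nat) : Int) + 1 := by
        rw [PySem.Int.bitLength_natCast (m := 2 * pvLowbit (n / 2)) (by omega)]
        congr 2
        omega
      have hblpos00 : 1 ≤ PySem.Int.bitLength ((pvLowbit (n / 2) : Nat) : Int) := by
        rw [PySem.Int.bitLength_natCast (m := pvLowbit (n / 2)) hl]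
        omega
      congr 1
      · rw [hbl]; push_cast; omega
      · by_cases hz : n / 2 - pvLowbit (n / 2) = 0
        · have hz2 : n - 2 * pvLowbit (n / 2) = 0 := by omega
          rw [hz, hz2]
          simp [pvBits]
        · have he : n - 2 * pvLowbit (n / 2) ≠ 0 := by omega
          have hm : (n - 2 * pvLowbit (n / 2)) % 2 = 0 := by omega
          have hd : (n - 2 * pvLowbit (n / 2)) / 2 = n / 2 - pvLowbit (n / 2) := by omega
          conv_rhs => rw [pvBits, if_neg he]
          simp [hm, hd]

-- A's loop computes the accumulator followed by the set-bit indices from iterator on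
theorem pvALoop_eq (n : Nat) (it : Int) (acc : List Int) :
    pvALoop n it acc = acc ++ pvBits n it := by
  fun_induction pvALoop n it acc with
  | case1 it acc => simp [pvBits]
  | case2 n it acc h ih =>
    rw [pvBits, if_neg h]
    by_cases hodd : n % 2 = 1 <;> simp [hodd] at ih ⊢ <;> simp [ih]

-- B's loop computes the accumulator followed by the set-bit indices from 0 on
theorem pvBLoop_eq (n : Nat) (acc : List Int) :
    pvBLoop n acc = acc ++ pvBits n 0 := by
  fun_induction pvBLoop n acc with
  | case1 acc => simp [pvBits]
  | case2 n acc h cl ih =>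
    have hc : cl = n - pvLowbit n := pvLand_pred n h
    have hle := pvLowbit_le n
    rw [hc] at ih ⊢
    have hsub : n - (n - pvLowbit n) = pvLowbit n := by omega
    rw [hsub] at ih ⊢
    rw [ih, pvBits_lowbit n 0 h]
    simp

theorem cpumask_to_cpulist_spec : Claim_equal_cpumask_to_cpulist := by
  intro cpumask _ _
  unfold Spec_cpumask_to_cpulist cpumask_to_cpulist cpumask_to_cpulist_alt
  cases h : PySem.Int.ofStrBase? cpumask 16 with
  | none => rfl
  | some n => simp only; rw [pvALoop_eq, pvBLoop_eq]
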